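-- pv_equiv track=rewrite | github.com/sjogleka/General_codes | occurencesInSubarray.py | occurrencesInSubarrays_1
-- ===== SOURCE A (Python) =====
-- from collections import Counter
--
-- def occurrencesInSubarrays_1(arr, m):
--     res = []
--     i = 0
--     while i <= len(arr) - m:
--         if (i+m <= len(arr)):
--             most_common, num_most_common = Counter(arr[i:i+m]).most_common(1)[0]
--             res.append(num_most_common)
--         i += 1
--     return res
-- ===== SOURCE B (Python) =====
-- def occurrencesInSubarrays_1(arr, m):
--     # O(n) sliding window: counts dict + count-of-counts dict tracking the
--     # running maximum frequency, instead of rebuilding a Counter per window.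
--     n = len(arr)
--     if m <= 0 or m > n:
--         return []
--     cnt = {}
--     cofc = {}  # cofc[c] = number of distinct values occurring exactly c times
--     maxf = 0
--     res = []
--     for i in range(n):
--         x = arr[i]
--         c = cnt.get(x, 0)
--         cnt[x] = c + 1
--         if c > 0:
--             cofc[c] -= 1
--         cofc[c + 1] = cofc.get(c + 1, 0) + 1
--         if c + 1 > maxf:
--             maxf = c + 1
--         if i >= m:
--             y = arr[i - m]
--             d = cnt[y]
--             cnt[y] = d - 1
--             cofc[d] -= 1
--             if d > 1:
--                 cofc[d - 1] += 1
--             if d == maxf and cofc[d] == 0: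
--                 maxf = d - 1
--         if i >= m - 1:
--             res.append(maxf)
--     return res
-- ===== Notes on version B (the rewrite author's own statement) =====
-- stated objective: faster
-- what changed: A rebuilds collections.Counter over every length-m slice and calls most_common(1) (O(n*m)); B slides a single window once over the array, maintaining a counts dict plus a count-of-counts dict so the running maximum frequency is updated in O(1) per step (O(n)).
import Mathlib
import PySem

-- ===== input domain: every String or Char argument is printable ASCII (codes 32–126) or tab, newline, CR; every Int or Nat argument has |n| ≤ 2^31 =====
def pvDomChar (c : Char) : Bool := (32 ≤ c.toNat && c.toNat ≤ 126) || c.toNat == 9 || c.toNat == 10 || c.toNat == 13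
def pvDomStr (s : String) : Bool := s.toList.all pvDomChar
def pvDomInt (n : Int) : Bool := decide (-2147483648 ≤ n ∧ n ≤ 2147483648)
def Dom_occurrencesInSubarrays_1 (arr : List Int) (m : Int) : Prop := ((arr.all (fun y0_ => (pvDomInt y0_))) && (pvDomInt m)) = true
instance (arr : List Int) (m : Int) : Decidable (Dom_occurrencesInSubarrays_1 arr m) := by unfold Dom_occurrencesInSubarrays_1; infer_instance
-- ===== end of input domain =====

-- B replaces A's per-window Counter rebuild by an O(n) sliding window with a counts
-- dict and a count-of-counts dict tracking the running maximum frequency (objective: faster).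

-- ===== PORT A =====
-- Counter(w).most_common(1)[0] : the first item with maximal count (heapq.nlargest(1)
-- keeps the first maximum; only its count is used by A).  `.getD (0, 0)` stands for the
-- IndexError on an empty counter (most_common(1) = []), which Pre_ excludes.
def pvMostCommon1 (items : List (Int × Int)) : Option (Int × Int) :=
  items.foldl (fun acc p =>
    match acc with
    | none => some p
    | some q => if q.2 < p.2 then some p else some q) none

def occurrencesInSubarrays_1 (arr : List Int) (m : Int) : List Int :=
  (PySem.List.pyRange 0 ((arr.length : Int) - m + 1) 1).foldl
    (fun res i =>
      if i + m ≤ (arr.length : Int) then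
        res ++ [((pvMostCommon1 (PySem.Dict.counter
                   (PySem.List.slice arr (some i) (some (i + m)))).items).getD (0, 0)).2]
      else res) []

-- ===== PORT B =====
-- one iteration of Source B's single loop; state = (cnt, cofc, maxf, res).
-- Python's `cofc[c] -= 1` / `cnt[y]` are ported as getD/insert: exact because the key is
-- always present when they run (the count/bucket being decremented is positive there).
def pvStepB (arr : List Int) (m : Int)
    (s : PySem.Dict Int Int × PySem.Dict Int Int × Int × List Int) (i : Int) :
    PySem.Dict Int Int × PySem.Dict Int Int × Int × List Int :=
  let cnt := s.1
  let cofc := s.2.1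
  let maxf := s.2.2.1
  let res := s.2.2.2
  let x := PySem.List.pyGetD arr i 0
  let c := cnt.getD x 0
  let cnt := cnt.insert x (c + 1)
  let cofc := if 0 < c then cofc.insert c (cofc.getD c 0 - 1) else cofc
  let cofc := cofc.insert (c + 1) (cofc.getD (c + 1) 0 + 1)
  let maxf := if maxf < c + 1 then c + 1 else maxf
  let s1 : PySem.Dict Int Int × PySem.Dict Int Int × Int :=
    if m ≤ i then
      let y := PySem.List.pyGetD arr (i - m) 0
      let d := cnt.getD y 0
      let cnt := cnt.insert y (d - 1)
      let cofc := cofc.insert d (cofc.getD d 0 - 1)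
      let cofc := if 1 < d then cofc.insert (d - 1) (cofc.getD (d - 1) 0 + 1) else cofc
      let maxf := if d = maxf ∧ cofc.getD d 0 = 0 then d - 1 else maxf
      (cnt, cofc, maxf)
    else (cnt, cofc, maxf)
  let res := if m - 1 ≤ i then res ++ [s1.2.2] else res
  (s1.1, s1.2.1, s1.2.2, res)

def occurrencesInSubarrays_1_alt (arr : List Int) (m : Int) : List Int :=
  let n : Int := arr.length
  if m ≤ 0 ∨ n < m then []
  else
    ((PySem.List.pyRange 0 n 1).foldl (pvStepB arr m)
      (PySem.Dict.empty, PySem.Dict.empty, 0, [])).2.2.2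

-- ===== PRECONDITION & SPEC =====
-- Pre_ excludes exactly m ≤ 0, where A always raises IndexError (most_common(1) on an
-- eventually-empty slice arr[i:i+m]).
def Pre_occurrencesInSubarrays_1 (arr : List Int) (m : Int) : Prop := 1 ≤ m
instance (arr : List Int) (m : Int) : Decidable (Pre_occurrencesInSubarrays_1 arr m) := by
  unfold Pre_occurrencesInSubarrays_1; infer_instance

def pvWitness_occurrencesInSubarrays_1 : List Int × Int := ([1, 2, 2, 1, 3], 3)

def Spec_occurrencesInSubarrays_1 (arr : List Int) (m : Int) (out : List Int) : Prop :=
  out = occurrencesInSubarrays_1_alt arr m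
instance (arr : List Int) (m : Int) (out : List Int) : Decidable (Spec_occurrencesInSubarrays_1 arr m out) := by
  unfold Spec_occurrencesInSubarrays_1; infer_instance

-- ===== CLAIM (what is proved, stated in full; the proofs are below) =====
def Claim_equal_occurrencesInSubarrays_1 : Prop := ∀ (arr : List Int) (m : Int),
  Dom_occurrencesInSubarrays_1 arr m → Pre_occurrencesInSubarrays_1 arr m →
  Spec_occurrencesInSubarrays_1 arr m (occurrencesInSubarrays_1 arr m)

-- ===== LEMMAS AND PROOFS =====

-- window k of width m
def pvW (arr : List Int) (mN k : Nat) : List Int := (arr.drop k).take mN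
-- multiset held after t loop iterations of B
def pvC (arr : List Int) (mN t : Nat) : List Int := (arr.drop (t - mN)).take (min t mN)
-- maximum multiplicity of a list
def pvMM (w : List Int) : Int := (w.map (fun x => (w.count x : Int))).foldl max 0
-- number of distinct values with multiplicity c
def pvND (w : List Int) (c : Int) : Int := ((PySem.List.dedup w).countP (fun z => (w.count z : Int) == c) : Int)

-- B's loop invariant after t iterations
def pvInv (arr : List Int) (mN t : Nat)
    (s : PySem.Dict Int Int × PySem.Dict Int Int × Int × List Int) : Prop :=
  s.1.keys.Nodup ∧
  (∀ x : Int, s.1.getD x 0 = ((pvC arr mN t).count x : Int)) ∧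
  s.2.1.keys.Nodup ∧
  (∀ c : Int, 1 ≤ c → s.2.1.getD c 0 = pvND (pvC arr mN t) c) ∧
  s.2.2.1 = pvMM (pvC arr mN t) ∧
  s.2.2.2 = (List.range (t - (mN - 1))).map (fun k => pvMM (pvW arr mN k))



-- ---------- generic max toolkit ----------

theorem pvFoldlMax_eq (l : List Int) (a M : Int) (hbase : a ≤ M)
    (hmem : ∀ y ∈ l, y ≤ M) (hM : M = a ∨ M ∈ l) : l.foldl max a = M := by
  apply le_antisymm
  · rcases PySem.List.foldl_max_mem l a with h | h
    · rw [h]; exact hbase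
    · exact hmem _ h
  · rcases hM with h | h
    · rw [h]; exact (PySem.List.le_foldl_max l a).1
    · exact (PySem.List.le_foldl_max l a).2 _ h

theorem pvMM_nonneg (w : List Int) : 0 ≤ pvMM w :=
  (PySem.List.le_foldl_max _ 0).1

theorem pvMM_le (w : List Int) (x : Int) : (w.count x : Int) ≤ pvMM w ∨ x ∉ w := by
  by_cases hx : x ∈ w
  · exact Or.inl ((PySem.List.le_foldl_max _ 0).2 _ (List.mem_map_of_mem hx))
  · exact Or.inr hx

theorem pvMM_le' (w : List Int) (x : Int) : (w.count x : Int) ≤ pvMM w := by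
  rcases pvMM_le w x with h | h
  · exact h
  · have : w.count x = 0 := List.count_eq_zero.mpr h
    rw [this]; exact_mod_cast pvMM_nonneg w

theorem pvMM_att {w : List Int} (hw : w ≠ []) : ∃ z ∈ w, (w.count z : Int) = pvMM w := by
  rcases PySem.List.foldl_max_mem (w.map (fun x => (w.count x : Int))) 0 with h | h
  · exfalso
    rcases List.exists_mem_of_ne_nil w hw with ⟨x, hx⟩
    have h1 : (w.count x : Int) ≤ pvMM w := pvMM_le' w x
    have h2 : 1 ≤ w.count x := List.one_le_count_iff.mpr hx
    have : pvMM w = 0 := h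
    omega
  · rcases List.mem_map.mp h with ⟨z, hz, hzz⟩
    exact ⟨z, hz, hzz⟩

theorem pvMM_pos {w : List Int} (hw : w ≠ []) : 1 ≤ pvMM w := by
  rcases List.exists_mem_of_ne_nil w hw with ⟨x, hx⟩
  have h1 : (w.count x : Int) ≤ pvMM w := pvMM_le' w x
  have h2 : 1 ≤ w.count x := List.one_le_count_iff.mpr hx
  omega

theorem pvMM_congr {w1 w2 : List Int} (h : ∀ z, w1.count z = w2.count z) :
    pvMM w1 = pvMM w2 := by
  have key : ∀ (u v : List Int), (∀ z, u.count z = v.count z) → pvMM u ≤ pvMM v := by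
    intro u v huv
    by_cases hu : u = []
    · subst hu; simpa [pvMM] using pvMM_nonneg v
    · rcases pvMM_att hu with ⟨z, hz, hzz⟩
      rw [← hzz, huv z]
      exact pvMM_le' v z
  exact le_antisymm (key _ _ h) (key _ _ (fun z => (h z).symm))

-- ---------- pvND toolkit ----------

theorem pvND_congr {w1 w2 : List Int} (h : ∀ z, w1.count z = w2.count z) (c : Int) :
    pvND w1 c = pvND w2 c := by
  have hperm : (PySem.List.dedup w1).Perm (PySem.List.dedup w2) := by
    rw [List.perm_ext_iff_of_nodup (PySem.List.nodup_dedup w1) (PySem.List.nodup_dedup w2)]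
    intro a
    rw [PySem.List.mem_dedup, PySem.List.mem_dedup]
    constructor
    · intro ha
      have h1 := List.count_pos_iff.mpr ha
      have h2 := h a
      exact List.count_pos_iff.mp (by omega)
    · intro ha
      have h1 := List.count_pos_iff.mpr ha
      have h2 := h a
      exact List.count_pos_iff.mp (by omega)
  unfold pvND
  have : ((PySem.List.dedup w1).countP (fun z => (w1.count z : Int) == c))
       = ((PySem.List.dedup w2).countP (fun z => (w2.count z : Int) == c)) := by
    rw [List.Perm.countP_eq _ hperm]
    apply List.countP_congr
    intro z _
    simp [h z]
  rw [this]

theorem pvND_pos {w : List Int} {z : Int} {c : Int} (hz : z ∈ w) (hc : (w.count z : Int) = c) :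
    1 ≤ pvND w c := by
  unfold pvND
  have hmem : z ∈ PySem.List.dedup w := (PySem.List.mem_dedup w z).mpr hz
  have : 0 < (PySem.List.dedup w).countP (fun z => (w.count z : Int) == c) := by
    rw [List.countP_pos_iff]
    exact ⟨z, hmem, by simp [hc]⟩
  omega

theorem pvND_zero {w : List Int} {c : Int} (h : pvND w c = 0) :
    ∀ z ∈ w, (w.count z : Int) ≠ c := by
  intro z hz hc
  have := pvND_pos hz hc
  omega

theorem pvCount_append_singleton (w : List Int) (x z : Int) :
    (w ++ [x]).count z = w.count z + (if z = x then 1 else 0) := by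
  by_cases hz : z = x
  · simp [hz, List.count_append]
  · simp [hz, List.count_append, List.count_eq_zero_of_not_mem, List.mem_singleton]

theorem pvCountP_diff_at {l : List Int} {p q : Int → Bool} {x : Int}
    (hnd : l.Nodup) (hx : x ∈ l) (hagree : ∀ z ∈ l, z ≠ x → p z = q z) :
    (l.countP p : Int) = (l.countP q : Int) + (if p x then 1 else 0) - (if q x then 1 else 0) := by
  have hperm := List.perm_cons_erase hx
  have hxe : x ∉ l.erase x := hnd.not_mem_erase
  rw [List.Perm.countP_eq p hperm, List.Perm.countP_eq q hperm]
  have hpq : (l.erase x).countP p = (l.erase x).countP q := by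
    apply List.countP_congr
    intro z hzl
    have hz1 : z ∈ l := List.mem_of_mem_erase hzl
    have hz2 : z ≠ x := fun he => hxe (he ▸ hzl)
    rw [hagree z hz1 hz2]
  rw [List.countP_cons, List.countP_cons, hpq]
  split_ifs <;> simp_all

theorem pvDedup_append_singleton (w : List Int) (x : Int) :
    PySem.List.dedup (w ++ [x]) =
      if x ∈ w then PySem.List.dedup w else PySem.List.dedup w ++ [x] := by
  have h1 : ∀ (u : List Int), PySem.List.dedup u = PySem.Set.ofList u := by
    intro u; simp
  rw [h1, h1, PySem.Set.ofList_eq_foldl, List.foldl_append]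
  rw [← PySem.Set.ofList_eq_foldl]
  show PySem.Set.add (PySem.Set.ofList w) x = _
  by_cases hx : x ∈ w
  · simp [PySem.Set.add, hx, PySem.Set.mem_ofList]
  · simp [PySem.Set.add, hx, PySem.Set.mem_ofList]

theorem pvND_add (w : List Int) (x : Int) (c : Int) (hc : 1 ≤ c) :
    pvND (w ++ [x]) c = pvND w c - (if c = (w.count x : Int) then 1 else 0)
      + (if c = (w.count x : Int) + 1 then 1 else 0) := by
  unfold pvND
  by_cases hx : x ∈ w
  · rw [pvDedup_append_singleton, if_pos hx]
    have hdiff := pvCountP_diff_at (l := PySem.List.dedup w)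
      (p := fun z => (((w ++ [x]).count z : Int) == c))
      (q := fun z => ((w.count z : Int) == c))
      (x := x) (PySem.List.nodup_dedup w) ((PySem.List.mem_dedup w x).mpr hx)
      (by intro z _ hzx
          simp only [pvCount_append_singleton, if_neg hzx, add_zero])
    rw [hdiff]
    simp only [pvCount_append_singleton, if_pos rfl]
    push_cast
    split_ifs <;> simp_all <;> omega
  · rw [pvDedup_append_singleton, if_neg hx]
    rw [List.countP_append]
    have hz0 : w.count x = 0 := List.count_eq_zero.mpr hx
    have h1 : (PySem.List.dedup w).countP (fun z => (((w ++ [x]).count z : Int) == c))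
            = (PySem.List.dedup w).countP (fun z => ((w.count z : Int) == c)) := by
      apply List.countP_congr
      intro z hzl
      have hzw : z ∈ w := (PySem.List.mem_dedup w z).mp hzl
      have hzx : z ≠ x := fun he => hx (he ▸ hzw)
      simp only [pvCount_append_singleton, if_neg hzx, add_zero]
    rw [h1]
    have h2 : List.countP (fun z => (((w ++ [x]).count z : Int) == c)) [x]
            = if c = (w.count x : Int) + 1 then 1 else 0 := by
      simp only [List.countP_singleton, pvCount_append_singleton, if_pos rfl]
      push_cast
      split_ifs <;> simp_all <;> omega
    rw [h2, hz0]
    push_cast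
    split_ifs <;> simp_all <;> omega

-- ---------- window lemmas ----------

theorem pvC_small {arr : List Int} {mN t : Nat} (h : t ≤ mN) :
    pvC arr mN t = arr.take t := by
  unfold pvC
  rw [Nat.sub_eq_zero_of_le h, min_eq_left h]
  simp

theorem pvC_large {arr : List Int} {mN t : Nat} (h : mN ≤ t) :
    pvC arr mN t = pvW arr mN (t - mN) := by
  unfold pvC pvW
  rw [min_eq_right h]

theorem pvC_succ_small {arr : List Int} {mN t : Nat} (harr : t < arr.length) (h : t < mN) :
    pvC arr mN (t + 1) = pvC arr mN t ++ [arr.getD t 0] := by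
  rw [pvC_small (by omega), pvC_small (by omega), List.take_succ]
  congr 1
  rw [List.getElem?_eq_getElem harr]
  simp [List.getD_eq_getElem?_getD, List.getElem?_eq_getElem harr]

theorem pvWindow_shift {arr : List Int} {mN k : Nat} (hm : 1 ≤ mN) (harr : k + mN < arr.length) :
    ∃ T, pvW arr mN k = arr.getD k 0 :: T ∧ pvW arr mN (k + 1) = T ++ [arr.getD (k + mN) 0] := by
  obtain ⟨p, rfl⟩ : ∃ p, mN = p + 1 := ⟨mN - 1, by omega⟩
  refine ⟨(arr.drop (k + 1)).take p, ?_, ?_⟩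
  · unfold pvW
    rw [List.drop_eq_getElem_cons (by omega : k < arr.length), List.take_succ_cons]
    congr 1
    simp [List.getD_eq_getElem?_getD, List.getElem?_eq_getElem (by omega : k < arr.length)]
  · unfold pvW
    rw [List.take_succ]
    congr 1
    rw [List.getElem?_drop]
    have h : k + 1 + p < arr.length := by omega
    rw [List.getElem?_eq_getElem h]
    have e : k + 1 + p = k + (p + 1) := by omega
    simp [e, List.getD_eq_getElem?_getD, List.getElem?_eq_getElem (by omega : k + (p + 1) < arr.length)]

theorem pvC_shift_counts {arr : List Int} {mN t : Nat} (hm : 1 ≤ mN)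
    (h1 : mN ≤ t) (h2 : t < arr.length) (z : Int) :
    (pvC arr mN t ++ [arr.getD t 0]).count z
      = (pvC arr mN (t + 1)).count z + (if z = arr.getD (t - mN) 0 then 1 else 0) := by
  have hk : (t - mN) + mN = t := by omega
  rcases pvWindow_shift hm (arr := arr) (mN := mN) (k := t - mN) (by omega) with ⟨T, hW1, hW2⟩
  rw [pvC_large h1, pvC_large (by omega : mN ≤ t + 1)]
  have ht1 : t + 1 - mN = (t - mN) + 1 := by omega
  rw [ht1, hW1, hW2, hk]
  rw [List.cons_append, List.count_cons]
  by_cases hz : z = arr.getD (t - mN) 0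
  · simp [hz]
  · have h3 : ¬ arr.getD (t - mN) 0 = z := fun h => hz h.symm
    simp only [List.getD_eq_getElem?_getD] at hz h3
    simp [hz, h3]

-- ---------- pvMM under one append ----------

theorem pvMM_add (w : List Int) (x : Int) :
    pvMM (w ++ [x]) = max (pvMM w) ((w.count x : Int) + 1) := by
  apply le_antisymm
  · rcases pvMM_att (w := w ++ [x]) (by simp) with ⟨z, hz, hzz⟩
    rw [← hzz, pvCount_append_singleton]
    by_cases hzx : z = x
    · subst hzx
      simp only [if_pos rfl]
      push_cast
      have := le_max_right (pvMM w) ((w.count z : Int) + 1)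
      omega
    · rw [if_neg hzx]
      have h1 : (w.count z : Int) ≤ pvMM w := pvMM_le' w z
      have := le_max_left (pvMM w) ((w.count x : Int) + 1)
      push_cast
      omega
  · apply max_le
    · by_cases hw : w = []
      · subst hw; simpa [pvMM] using pvMM_nonneg [x]
      · rcases pvMM_att hw with ⟨z, hz, hzz⟩
        rw [← hzz]
        have h1 : ((w ++ [x]).count z : Int) ≤ pvMM (w ++ [x]) := pvMM_le' _ z
        rw [pvCount_append_singleton] at h1
        push_cast at h1 ⊢
        split_ifs at h1 <;> omega
    · have h1 : ((w ++ [x]).count x : Int) ≤ pvMM (w ++ [x]) := pvMM_le' _ x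
      rw [pvCount_append_singleton, if_pos rfl] at h1
      push_cast at h1
      omega

-- ---------- A-side: most_common(1)[0][1] is the max multiplicity ----------

theorem pvMostCommon1_foldl (t : List (Int × Int)) : ∀ q : Int × Int,
    ((t.foldl (fun acc p =>
        match acc with
        | none => some p
        | some q => if q.2 < p.2 then some p else some q) (some q)).getD (0, 0)).2
      = t.foldl (fun a p => max a p.2) q.2 := by
  induction t with
  | nil => intro q; simp
  | cons p t ih =>
    intro q
    rw [List.foldl_cons, List.foldl_cons]
    have hstep : (match some q with
        | none => some p
        | some q => if q.2 < p.2 then some p else some q) = some (if q.2 < p.2 then p else q) := by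
      by_cases h : q.2 < p.2 <;> simp [h]
    rw [hstep, ih]
    congr 1
    by_cases h : q.2 < p.2 <;> simp [h] <;> omega

theorem pvAval (w : List Int) (hw : w ≠ []) :
    ((pvMostCommon1 (PySem.Dict.counter w).items).getD (0, 0)).2 = pvMM w := by
  rw [PySem.Dict.items_counter]
  rcases hE : PySem.Set.ofList w with _ | ⟨d0, Drest⟩
  · exfalso
    rcases List.exists_mem_of_ne_nil w hw with ⟨z, hz⟩
    have := (PySem.Set.mem_ofList w z).mpr hz
    rw [hE] at this
    simp at this
  · unfold pvMostCommon1
    rw [List.map_cons, List.foldl_cons]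
    show ((List.foldl _ (some (d0, (w.count d0 : Int))) _).getD (0, 0)).2 = _
    rw [pvMostCommon1_foldl]
    have hfold : (List.map (fun k => (k, (w.count k : Int))) Drest).foldl
        (fun a p => max a p.2) (w.count d0 : Int)
        = Drest.foldl (fun a k => max a (w.count k : Int)) (w.count d0 : Int) := by
      rw [List.foldl_map]
    rw [hfold]
    have hmemE : ∀ z : Int, z ∈ w ↔ (z = d0 ∨ z ∈ Drest) := by
      intro z
      rw [← PySem.Set.mem_ofList w z, hE, List.mem_cons]
    have hfold2 : Drest.foldl (fun a k => max a (w.count k : Int)) (w.count d0 : Int)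
        = (Drest.map (fun k => (w.count k : Int))).foldl max (w.count d0 : Int) := by
      rw [List.foldl_map]
    rw [hfold2]
    apply pvFoldlMax_eq
    · exact pvMM_le' w d0
    · intro y hy
      rcases List.mem_map.mp hy with ⟨z, _, rfl⟩
      exact pvMM_le' w z
    · rcases pvMM_att hw with ⟨z, hz, hzz⟩
      rcases (hmemE z).mp hz with h | h
      · left; rw [← hzz, h]
      · right; rw [← hzz]; exact List.mem_map_of_mem h

-- A as a map over window starts
theorem pvA_eq (arr : List Int) (m : Int) (hm : 1 ≤ m) :
    occurrencesInSubarrays_1 arr m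
      = (List.range ((arr.length : Int) - m + 1).toNat).map
          (fun k => pvMM (pvW arr m.toNat k)) := by
  unfold occurrencesInSubarrays_1
  rw [PySem.List.foldl_congr_mem _ _
    (fun res i => res ++ [((pvMostCommon1 (PySem.Dict.counter
        (PySem.List.slice arr (some i) (some (i + m)))).items).getD (0, 0)).2]) _
    (by intro acc i hi
        rcases PySem.List.mem_pyRange_one.mp hi with ⟨h0, h1⟩
        rw [if_pos (by omega)])]
  rw [PySem.List.foldl_append_singleton_eq_map, List.nil_append]
  rw [PySem.List.pyRange_one, List.map_map]
  have he : ((arr.length : Int) - m + 1 - 0).toNat = ((arr.length : Int) - m + 1).toNat := by omega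
  rw [he]
  apply List.map_congr_left
  intro k hk
  have hk' : (k : Int) < (arr.length : Int) - m + 1 := by
    have := List.mem_range.mp hk
    omega
  simp only [Function.comp_apply, zero_add]
  have hslice : PySem.List.slice arr (some (k : Int)) (some ((k : Int) + m))
      = pvW arr m.toNat k := by
    rw [PySem.List.slice_toNat arr (by omega) (by omega)]
    unfold pvW
    congr 1
    omega
  rw [hslice]
  apply pvAval
  have hlen : (pvW arr m.toNat k).length = min m.toNat (arr.length - k) := by
    unfold pvW
    simp
  intro hnil
  rw [hnil] at hlen
  simp at hlen
  omega

-- ---------- B-side: the add phase of one iteration ----------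

theorem pvAdd_inv (w : List Int) (x : Int) (cnt cofc : PySem.Dict Int Int) (maxf : Int)
    (h1 : cnt.keys.Nodup) (h2 : ∀ z, cnt.getD z 0 = (w.count z : Int))
    (h3 : cofc.keys.Nodup) (h4 : ∀ e : Int, 1 ≤ e → cofc.getD e 0 = pvND w e)
    (h5 : maxf = pvMM w) :
    (cnt.insert x (cnt.getD x 0 + 1)).keys.Nodup ∧
    (∀ z, (cnt.insert x (cnt.getD x 0 + 1)).getD z 0 = ((w ++ [x]).count z : Int)) ∧
    ((if 0 < cnt.getD x 0 then cofc.insert (cnt.getD x 0) (cofc.getD (cnt.getD x 0) 0 - 1) else cofc).insert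
      (cnt.getD x 0 + 1)
      ((if 0 < cnt.getD x 0 then cofc.insert (cnt.getD x 0) (cofc.getD (cnt.getD x 0) 0 - 1) else cofc).getD
        (cnt.getD x 0 + 1) 0 + 1)).keys.Nodup ∧
    (∀ e : Int, 1 ≤ e →
      ((if 0 < cnt.getD x 0 then cofc.insert (cnt.getD x 0) (cofc.getD (cnt.getD x 0) 0 - 1) else cofc).insert
        (cnt.getD x 0 + 1)
        ((if 0 < cnt.getD x 0 then cofc.insert (cnt.getD x 0) (cofc.getD (cnt.getD x 0) 0 - 1) else cofc).getD
          (cnt.getD x 0 + 1) 0 + 1)).getD e 0 = pvND (w ++ [x]) e) ∧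
    (if maxf < cnt.getD x 0 + 1 then cnt.getD x 0 + 1 else maxf) = pvMM (w ++ [x]) := by
  have hc : cnt.getD x 0 = (w.count x : Int) := h2 x
  have hcnn : 0 ≤ cnt.getD x 0 := by rw [hc]; positivity
  refine ⟨PySem.Dict.nodup_keys_insert _ _ _ h1, ?_, ?_, ?_, ?_⟩
  · intro z
    rw [PySem.Dict.getD_insert]
    rw [pvCount_append_singleton]
    by_cases hz : z = x
    · subst hz; rw [if_pos rfl, if_pos rfl, hc]; push_cast; ring
    · rw [if_neg hz, if_neg hz, h2 z]; push_cast; ring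
  · split_ifs with h0
    · exact PySem.Dict.nodup_keys_insert _ _ _ (PySem.Dict.nodup_keys_insert _ _ _ h3)
    · exact PySem.Dict.nodup_keys_insert _ _ _ h3
  · intro e he
    have hnd := pvND_add w x e he
    rw [PySem.Dict.getD_insert]
    by_cases he1 : e = cnt.getD x 0 + 1
    · rw [if_pos he1]
      split_ifs with h0
      · rw [PySem.Dict.getD_insert, if_neg (by omega), h4 _ (by omega)]
        rw [hnd, he1, hc]
        rw [if_neg (by omega), if_pos (by omega)]
        ring
      · rw [h4 _ (by omega), hnd, he1, hc]
        rw [if_neg (by omega), if_pos (by omega)]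
        ring
    · rw [if_neg he1]
      split_ifs with h0
      · rw [PySem.Dict.getD_insert]
        by_cases he2 : e = cnt.getD x 0
        · rw [if_pos he2, h4 _ (by omega), hnd, he2, hc]
          rw [if_pos (by omega), if_neg (by rw [← hc]; omega)]
          ring
        · rw [if_neg he2, h4 _ he, hnd]
          rw [if_neg (by rw [← hc]; exact he2), if_neg (by rw [← hc]; exact he1)]
          ring
      · have he2 : e ≠ cnt.getD x 0 := by omega
        rw [h4 _ he, hnd]
        rw [if_neg (by rw [← hc]; exact he2), if_neg (by rw [← hc]; exact he1)]
        ring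
  · rw [pvMM_add, h5, ← hc]
    rcases max_cases (pvMM w) (cnt.getD x 0 + 1) with ⟨ha, hb⟩ | ⟨ha, hb⟩ <;>
      rw [ha] <;> split_ifs <;> omega

-- ---------- B-side: the remove phase of one iteration ----------

theorem pvND_ne_zero {w : List Int} {c : Int} (h : pvND w c ≠ 0) :
    ∃ z ∈ w, (w.count z : Int) = c := by
  unfold pvND at h
  have h2 : ¬ ∀ a ∈ PySem.List.dedup w, ¬ ((w.count a : Int) == c) = true := by
    intro hall
    exact h (by exact_mod_cast List.countP_eq_zero.mpr hall)
  push_neg at h2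
  rcases h2 with ⟨z, hz, hzz⟩
  exact ⟨z, (PySem.List.mem_dedup w z).mp hz, by simpa using hzz⟩

theorem pvRemove_inv (w' : List Int) (y : Int) (cnt cofc : PySem.Dict Int Int) (maxf : Int)
    (hw' : w' ≠ [])
    (h1 : cnt.keys.Nodup)
    (h2 : ∀ z, cnt.getD z 0 = ((w' ++ [y]).count z : Int))
    (h3 : cofc.keys.Nodup)
    (h4 : ∀ e : Int, 1 ≤ e → cofc.getD e 0 = pvND (w' ++ [y]) e)
    (h5 : maxf = pvMM (w' ++ [y])) :
    (cnt.insert y (cnt.getD y 0 - 1)).keys.Nodup ∧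
    (∀ z, (cnt.insert y (cnt.getD y 0 - 1)).getD z 0 = (w'.count z : Int)) ∧
    (if 1 < cnt.getD y 0 then
        (cofc.insert (cnt.getD y 0) (cofc.getD (cnt.getD y 0) 0 - 1)).insert (cnt.getD y 0 - 1)
          ((cofc.insert (cnt.getD y 0) (cofc.getD (cnt.getD y 0) 0 - 1)).getD (cnt.getD y 0 - 1) 0 + 1)
      else cofc.insert (cnt.getD y 0) (cofc.getD (cnt.getD y 0) 0 - 1)).keys.Nodup ∧
    (∀ e : Int, 1 ≤ e →
      (if 1 < cnt.getD y 0 then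
          (cofc.insert (cnt.getD y 0) (cofc.getD (cnt.getD y 0) 0 - 1)).insert (cnt.getD y 0 - 1)
            ((cofc.insert (cnt.getD y 0) (cofc.getD (cnt.getD y 0) 0 - 1)).getD (cnt.getD y 0 - 1) 0 + 1)
        else cofc.insert (cnt.getD y 0) (cofc.getD (cnt.getD y 0) 0 - 1)).getD e 0 = pvND w' e) ∧
    ((if cnt.getD y 0 = maxf ∧
        (if 1 < cnt.getD y 0 then
            (cofc.insert (cnt.getD y 0) (cofc.getD (cnt.getD y 0) 0 - 1)).insert (cnt.getD y 0 - 1)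
              ((cofc.insert (cnt.getD y 0) (cofc.getD (cnt.getD y 0) 0 - 1)).getD (cnt.getD y 0 - 1) 0 + 1)
          else cofc.insert (cnt.getD y 0) (cofc.getD (cnt.getD y 0) 0 - 1)).getD (cnt.getD y 0) 0 = 0
      then cnt.getD y 0 - 1 else maxf) = pvMM w') := by
  have hcy : ((w' ++ [y]).count y : Int) = (w'.count y : Int) + 1 := by
    rw [pvCount_append_singleton, if_pos rfl]; push_cast; ring
  have hd : cnt.getD y 0 = (w'.count y : Int) + 1 := by rw [h2 y, hcy]
  have hd1 : 1 ≤ cnt.getD y 0 := by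
    rw [hd]
    have : (0:Int) ≤ (w'.count y : Int) := by positivity
    omega
  have hcz : ∀ z, z ≠ y → ((w' ++ [y]).count z : Int) = (w'.count z : Int) := by
    intro z hz; rw [pvCount_append_singleton, if_neg hz]; push_cast; ring
  -- pvND of w' in terms of pvND of (w' ++ [y])
  have hndrel : ∀ e : Int, 1 ≤ e →
      pvND w' e = pvND (w' ++ [y]) e + (if e = cnt.getD y 0 - 1 then 1 else 0)
        - (if e = cnt.getD y 0 then 1 else 0) := by
    intro e he
    have := pvND_add w' y e he
    rw [this, hd]
    have e1 : ((w'.count y : Int) + 1) - 1 = (w'.count y : Int) := by ring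
    rw [e1]
    ring
  -- the updated cofc lookup table
  have hcofc : ∀ e : Int, 1 ≤ e →
      (if 1 < cnt.getD y 0 then
          (cofc.insert (cnt.getD y 0) (cofc.getD (cnt.getD y 0) 0 - 1)).insert (cnt.getD y 0 - 1)
            ((cofc.insert (cnt.getD y 0) (cofc.getD (cnt.getD y 0) 0 - 1)).getD (cnt.getD y 0 - 1) 0 + 1)
        else cofc.insert (cnt.getD y 0) (cofc.getD (cnt.getD y 0) 0 - 1)).getD e 0 = pvND w' e := by
    intro e he
    split_ifs with hgt
    · rw [PySem.Dict.getD_insert]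
      by_cases he1 : e = cnt.getD y 0 - 1
      · subst he1
        rw [if_pos rfl, PySem.Dict.getD_insert, if_neg (by omega), h4 _ (by omega)]
        rw [hndrel _ he, if_pos rfl, if_neg (by omega)]
        ring
      · rw [if_neg he1, PySem.Dict.getD_insert]
        by_cases he2 : e = cnt.getD y 0
        · subst he2
          rw [if_pos rfl, h4 _ (by omega), hndrel _ he, if_neg (by omega), if_pos rfl]
          ring
        · rw [if_neg he2, h4 _ he, hndrel _ he, if_neg he1, if_neg he2]
          ring
    · rw [PySem.Dict.getD_insert]
      by_cases he2 : e = cnt.getD y 0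
      · subst he2
        rw [if_pos rfl, h4 _ (by omega), hndrel _ he, if_neg (by omega), if_pos rfl]
        ring
      · rw [if_neg he2, h4 _ he, hndrel _ he, if_neg (by omega), if_neg he2]
        ring
  have hWle : pvMM w' ≤ maxf := by
    rcases pvMM_att hw' with ⟨z, hz, hzz⟩
    rw [← hzz, h5]
    calc (w'.count z : Int) ≤ ((w' ++ [y]).count z : Int) := by
            rw [pvCount_append_singleton]; push_cast; split_ifs <;> omega
      _ ≤ pvMM (w' ++ [y]) := pvMM_le' _ z
  have hdle : cnt.getD y 0 ≤ maxf := by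
    rw [h5, h2 y]
    exact pvMM_le' _ y
  refine ⟨PySem.Dict.nodup_keys_insert _ _ _ h1, ?_, ?_, hcofc, ?_⟩
  · intro z
    rw [PySem.Dict.getD_insert]
    by_cases hz : z = y
    · subst hz; rw [if_pos rfl, hd]; ring
    · rw [if_neg hz, h2 z, hcz z hz]
  · split_ifs with hgt
    · exact PySem.Dict.nodup_keys_insert _ _ _ (PySem.Dict.nodup_keys_insert _ _ _ h3)
    · exact PySem.Dict.nodup_keys_insert _ _ _ h3
  · rw [hcofc _ hd1]
    split_ifs with hP
    · -- y was the unique element at the maximal count: the maximum drops by one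
      rcases hP with ⟨hPd, hP0⟩
      have hzero := pvND_zero hP0
      rcases pvMM_att hw' with ⟨z, hz, hzz⟩
      have hne : pvMM w' ≠ cnt.getD y 0 := by
        rw [← hzz]; exact hzero z hz
      by_cases hd2 : 2 ≤ cnt.getD y 0
      · have : cnt.getD y 0 - 1 ≤ pvMM w' := by
          have := pvMM_le' w' y
          omega
        omega
      · -- cnt.getD y 0 = 1 is impossible: some element of w' would still have count 1
        exfalso
        have h1' : pvMM w' ≥ 1 := pvMM_pos hw'
        have h2' : pvMM w' ≤ maxf := hWle
        have : cnt.getD y 0 = 1 := by omega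
        omega
    · push_neg at hP
      by_cases hdm : cnt.getD y 0 = maxf
      · have hne0 := hP hdm
        rcases pvND_ne_zero hne0 with ⟨z, hz, hzz⟩
        have : pvMM w' ≥ cnt.getD y 0 := by rw [← hzz]; exact pvMM_le' w' z
        omega
      · have hwTne : w' ++ [y] ≠ [] := by simp
        rcases pvMM_att hwTne with ⟨z, hz, hzz⟩
        have hzy : z ≠ y := by
          intro he
          subst he
          rw [hcy] at hzz
          rw [h5] at hdm
          omega
        have : pvMM w' ≥ maxf := by
          rw [h5, ← hzz, hcz z hzy]
          exact pvMM_le' w' z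
        omega

-- ---------- one full iteration preserves the invariant ----------

theorem pvStep (arr : List Int) (m : Int) (hm : 1 ≤ m) (hmn : m.toNat ≤ arr.length)
    {t : Nat} (ht : t < arr.length) (cnt cofc : PySem.Dict Int Int) (maxf : Int) (res : List Int)
    (hinv : pvInv arr m.toNat t (cnt, cofc, maxf, res)) :
    pvInv arr m.toNat (t + 1) (pvStepB arr m (cnt, cofc, maxf, res) (t : Int)) := by
  obtain ⟨h1, h2, h3, h4, h5, h6⟩ := hinv
  dsimp only at h1 h2 h3 h4 h5 h6
  have hmE : ((m.toNat : Nat) : Int) = m := Int.toNat_of_nonneg (by omega)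
  set mN := m.toNat with hmN
  have hxeq : PySem.List.pyGetD arr ((t : Nat) : Int) 0 = arr.getD t 0 :=
    PySem.List.pyGetD_natCast arr t 0
  obtain ⟨A1, A2, A3, A4, A5⟩ := pvAdd_inv (pvC arr mN t) (arr.getD t 0) cnt cofc maxf h1 h2 h3 h4 h5
  by_cases hrem : m ≤ ((t : Nat) : Int)
  · -- removal branch : mN ≤ t
    have htm : mN ≤ t := by omega
    have hyeq : PySem.List.pyGetD arr (((t : Nat) : Int) - m) 0 = arr.getD (t - mN) 0 := by
      have : ((t : Nat) : Int) - m = (((t - mN : Nat)) : Int) := by omega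
      rw [this, PySem.List.pyGetD_natCast]
    -- counts of the transient (m+1)-window agree with those of (next window ++ [removed])
    have hshift : ∀ z, ((pvC arr mN t ++ [arr.getD t 0]).count z : Int)
        = ((pvC arr mN (t + 1) ++ [arr.getD (t - mN) 0]).count z : Int) := by
      intro z
      rw [pvCount_append_singleton (pvC arr mN (t + 1)) (arr.getD (t - mN) 0) z,
          pvC_shift_counts (arr := arr) (mN := mN) (by omega) htm ht z]
    have hshiftN : ∀ z, (pvC arr mN t ++ [arr.getD t 0]).count z
        = (pvC arr mN (t + 1) ++ [arr.getD (t - mN) 0]).count z := by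
      intro z; have := hshift z; omega
    have B2 : ∀ z, (cnt.insert (arr.getD t 0) (cnt.getD (arr.getD t 0) 0 + 1)).getD z 0
        = (((pvC arr mN (t + 1) ++ [arr.getD (t - mN) 0]).count z : Nat) : Int) := by
      intro z; rw [A2 z, hshiftN z]
    have B4 : ∀ e : Int, 1 ≤ e →
        ((if 0 < cnt.getD (arr.getD t 0) 0 then
            cofc.insert (cnt.getD (arr.getD t 0) 0) (cofc.getD (cnt.getD (arr.getD t 0) 0) 0 - 1)
          else cofc).insert (cnt.getD (arr.getD t 0) 0 + 1)
          ((if 0 < cnt.getD (arr.getD t 0) 0 then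
              cofc.insert (cnt.getD (arr.getD t 0) 0) (cofc.getD (cnt.getD (arr.getD t 0) 0) 0 - 1)
            else cofc).getD (cnt.getD (arr.getD t 0) 0 + 1) 0 + 1)).getD e 0
          = pvND (pvC arr mN (t + 1) ++ [arr.getD (t - mN) 0]) e := by
      intro e he
      rw [A4 e he]
      exact pvND_congr hshiftN e
    have B5 : (if maxf < cnt.getD (arr.getD t 0) 0 + 1 then cnt.getD (arr.getD t 0) 0 + 1 else maxf)
        = pvMM (pvC arr mN (t + 1) ++ [arr.getD (t - mN) 0]) := by
      rw [A5]
      exact pvMM_congr hshiftN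
    have hw'ne : pvC arr mN (t + 1) ≠ [] := by
      rw [pvC_large (by omega : mN ≤ t + 1)]
      unfold pvW
      intro h
      have hlen := congrArg List.length h
      simp at hlen
      omega
    obtain ⟨R1, R2, R3, R4, R5⟩ :=
      pvRemove_inv (pvC arr mN (t + 1)) (arr.getD (t - mN) 0) _ _ _ hw'ne A1 B2 A3 B4 B5
    -- reduce the port's step and discharge the invariant
    simp only [pvStepB, hxeq, hyeq]
    rw [if_pos hrem, if_pos (by omega : m - 1 ≤ ((t : Nat) : Int))]
    refine ⟨R1, R2, R3, R4, R5, ?_⟩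
    -- the result list
    simp only
    rw [h6, R5]
    have hidx : (t + 1) - (mN - 1) = (t - (mN - 1)) + 1 := by omega
    rw [hidx, List.range_succ, List.map_append, List.map_cons, List.map_nil]
    have hW : pvC arr mN (t + 1) = pvW arr mN (t - (mN - 1)) := by
      rw [pvC_large (by omega : mN ≤ t + 1)]
      rw [show t + 1 - mN = t - (mN - 1) from by omega]
    rw [hW]
  · -- no removal : t < mN
    have htm : t < mN := by omega
    have hCe : pvC arr mN (t + 1) = pvC arr mN t ++ [arr.getD t 0] := pvC_succ_small ht (by omega)
    simp only [pvStepB, hxeq]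
    rw [if_neg hrem]
    by_cases happ : m - 1 ≤ ((t : Nat) : Int)
    · -- t = mN - 1 : first full window, first appended answer
      have hteq : t = mN - 1 := by omega
      rw [if_pos happ]
      refine ⟨A1, ?_, A3, ?_, ?_, ?_⟩
      · rw [hCe]; exact A2
      · rw [hCe]; exact A4
      · rw [hCe]; exact A5
      · simp only
        rw [h6, A5]
        have h0 : t - (mN - 1) = 0 := by omega
        have h1' : (t + 1) - (mN - 1) = 1 := by omega
        rw [h0, h1', List.range_zero, List.map_nil, List.nil_append]
        rw [List.range_one, List.map_cons, List.map_nil]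
        have hW : pvC arr mN t ++ [arr.getD t 0] = pvW arr mN 0 := by
          rw [← hCe, pvC_large (by omega : mN ≤ t + 1)]
          rw [show t + 1 - mN = 0 from by omega]
        rw [hW]
    · -- window not yet full : nothing appended
      rw [if_neg happ]
      refine ⟨A1, ?_, A3, ?_, ?_, ?_⟩
      · rw [hCe]; exact A2
      · rw [hCe]; exact A4
      · rw [hCe]; exact A5
      · simp only
        rw [h6, show (t + 1) - (mN - 1) = t - (mN - 1) from by omega]

-- ---------- the loop, the initial state, and B's characterization ----------

theorem pvLoopAux (arr : List Int) (m : Int) (hm : 1 ≤ m) (hmn : m.toNat ≤ arr.length) :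
    ∀ (k t : Nat) (s : PySem.Dict Int Int × PySem.Dict Int Int × Int × List Int),
      t + k = arr.length → pvInv arr m.toNat t s →
      pvInv arr m.toNat arr.length
        ((PySem.List.pyRange ((t : Nat) : Int) ((arr.length : Nat) : Int) 1).foldl (pvStepB arr m) s) := by
  intro k
  induction k with
  | zero =>
    intro t s hk hinv
    rw [PySem.List.pyRange_one_eq_nil (by omega)]
    rw [List.foldl_nil]
    rw [← hk]
    simpa using hinv
  | succ k ih =>
    intro t s hk hinv
    obtain ⟨cnt, cofc, maxf, res⟩ := s
    rw [PySem.List.pyRange_one_cons (by omega : ((t : Nat) : Int) < ((arr.length : Nat) : Int))]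
    rw [List.foldl_cons]
    have hst := pvStep arr m hm hmn (t := t) (by omega) cnt cofc maxf res hinv
    have hcast : ((t : Nat) : Int) + 1 = (((t + 1 : Nat)) : Int) := by push_cast; ring
    rw [hcast]
    exact ih (t + 1) _ (by omega) hst

theorem pvInit (arr : List Int) (m : Int) :
    pvInv arr m.toNat 0 (PySem.Dict.empty, PySem.Dict.empty, 0, []) := by
  have hC : pvC arr m.toNat 0 = [] := by
    unfold pvC
    simp
  refine ⟨PySem.Dict.nodup_keys_empty, ?_, PySem.Dict.nodup_keys_empty, ?_, ?_, ?_⟩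
  · intro z; rw [hC, PySem.Dict.getD_empty]; simp
  · intro e _; rw [hC, PySem.Dict.getD_empty]
    unfold pvND
    simp [PySem.List.dedup]
  · rw [hC]; simp [pvMM]
  · simp

theorem pvB_eq (arr : List Int) (m : Int) (hm : 1 ≤ m) (hmn : m.toNat ≤ arr.length) :
    occurrencesInSubarrays_1_alt arr m
      = (List.range (arr.length - (m.toNat - 1))).map (fun k => pvMM (pvW arr m.toNat k)) := by
  unfold occurrencesInSubarrays_1_alt
  rw [if_neg (by push_neg; constructor <;> omega :
      ¬ (m ≤ 0 ∨ ((arr.length : Nat) : Int) < m))]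
  have hloop := pvLoopAux arr m hm hmn arr.length 0
      (PySem.Dict.empty, PySem.Dict.empty, 0, []) (by omega) (pvInit arr m)
  have h0 : (((0 : Nat)) : Int) = (0 : Int) := by norm_num
  rw [h0] at hloop
  exact hloop.2.2.2.2.2

-- ===== VERDICT (by name: the statement is the Claim_ definition above) =====
theorem occurrencesInSubarrays_1_spec : Claim_equal_occurrencesInSubarrays_1 := by
  unfold Claim_equal_occurrencesInSubarrays_1
  intro arr m _ hpre
  unfold Spec_occurrencesInSubarrays_1
  have hm : 1 ≤ m := hpre
  by_cases hlen : (arr.length : Int) < m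
  · rw [pvA_eq arr m hm]
    unfold occurrencesInSubarrays_1_alt
    rw [if_pos (Or.inr (by exact_mod_cast hlen))]
    rw [show ((arr.length : Int) - m + 1).toNat = 0 from by omega]
    simp
  · rw [pvA_eq arr m hm, pvB_eq arr m hm (by omega)]
    rw [show ((arr.length : Int) - m + 1).toNat = arr.length - (m.toNat - 1) from by omega]
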